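-- pv_equiv track=rewrite | github.com/tonglinyan/identification_context | pipeline/utils.py | extract_table_answers
-- ===== SOURCE A (Python) =====
-- from typing import Dict, List, Optional, Tuple
--
-- def extract_table_answers(
--     text: str
-- ) -> List[str]:
--
--     asws = []
--
--     asw_toks = []
--     is_asw = False
--     for tok in text.split():
--
--         if tok == ']':
--             asws.append(' '.join(asw_toks))
--             is_asw = False
--             asw_toks = []
--
--         if is_asw:
--             asw_toks.append(tok)
--
--         if tok == '[':
--             is_asw = True
--     return asws
-- ===== SOURCE B (Python) =====
-- def extract_table_answers(text):
--     results = []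
--     segment = []
--     for tok in text.split():
--         if tok == ']':
--             if '[' in segment:
--                 results.append(' '.join(segment[segment.index('[') + 1:]))
--             else:
--                 results.append('')
--             segment = []
--         else:
--             segment.append(tok)
--     return results
-- ===== Notes on version B (the rewrite author's own statement) =====
-- stated objective: alternative
-- what changed: Replaces the online is_asw flag and running asw_toks list with a batch decomposition: accumulate the whole segment between ']' tokens, then on each ']' locate the first '[' and join everything after it.
import Mathlib
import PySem

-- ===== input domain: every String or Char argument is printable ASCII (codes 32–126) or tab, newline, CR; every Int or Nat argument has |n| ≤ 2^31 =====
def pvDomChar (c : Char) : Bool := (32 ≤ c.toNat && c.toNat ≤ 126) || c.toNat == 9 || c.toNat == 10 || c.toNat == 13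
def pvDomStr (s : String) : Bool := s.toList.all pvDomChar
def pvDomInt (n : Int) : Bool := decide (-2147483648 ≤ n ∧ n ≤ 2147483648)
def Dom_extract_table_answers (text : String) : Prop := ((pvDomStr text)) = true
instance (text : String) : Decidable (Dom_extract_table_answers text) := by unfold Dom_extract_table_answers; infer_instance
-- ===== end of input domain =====

-- B replaces A's online is_asw flag with a batch decomposition (accumulate the segment, then
-- locate the first '[' on each ']'); same cost, proved to return the same list.

-- ===== PORT A =====
-- state: (asws, asw_toks, is_asw), exactly A's three variables, updated in A's statement order
def pvStepA (st : List String × List String × Bool) (tok : String) :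
    List String × List String × Bool :=
  let st1 := if tok == "]" then (st.1 ++ [PySem.Str.join " " st.2.1], ([] : List String), false)
             else st
  let st2 := if st1.2.2 then (st1.1, st1.2.1 ++ [tok], st1.2.2) else st1
  if tok == "[" then (st2.1, st2.2.1, true) else st2

def extract_table_answers (text : String) : List String :=
  ((PySem.Str.split₀ text).foldl pvStepA ([], [], false)).1

-- ===== PORT B =====
-- state: (results, segment); on ']' find the first '[' in the batch and flush
def pvStepB (st : List String × List String) (tok : String) :
    List String × List String :=
  if tok == "]" then
    let out := if st.2.contains "[" then
        PySem.Str.join " " (st.2.drop (((PySem.List.index? st.2 "[").getD 0) + 1))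
      else ""
    (st.1 ++ [out], [])
  else (st.1, st.2 ++ [tok])

def extract_table_answers_alt (text : String) : List String :=
  ((PySem.Str.split₀ text).foldl pvStepB ([], [])).1

-- ===== PRECONDITION & SPEC =====
def Spec_extract_table_answers (text : String) (out : List String) : Prop := out = extract_table_answers_alt text
instance (text : String) (out : List String) : Decidable (Spec_extract_table_answers text out) := by unfold Spec_extract_table_answers; infer_instance

-- ===== CLAIM (what is proved, stated in full; the proofs are below) =====
def Claim_equal_extract_table_answers : Prop := ∀ (text : String), Dom_extract_table_answers text → Spec_extract_table_answers text (extract_table_answers text)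

-- ===== LEMMAS AND PROOFS =====

-- A's asw_toks, reconstructed from B's segment: everything after the first '['
def pvTail (seg : List String) : List String :=
  match PySem.List.index? seg "[" with
  | some i => seg.drop (i + 1)
  | none => []

lemma pvTail_append_mem (seg : List String) (tok : String) (h : "[" ∈ seg) :
    pvTail (seg ++ [tok]) = pvTail seg ++ [tok] := by
  unfold pvTail
  rw [PySem.List.index?_append_of_mem _ h]
  rcases Option.isSome_iff_exists.1 ((PySem.List.index?_isSome_iff (xs := seg) (v := "[")).2 h) with ⟨i, hi⟩
  rw [hi]
  rcases PySem.List.getElem_of_index?_eq_some hi with ⟨hk, _, _⟩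
  show List.drop (i + 1) (seg ++ [tok]) = List.drop (i + 1) seg ++ [tok]
  exact List.drop_append_of_le_length (by omega)

lemma pvTail_append_not_mem (seg : List String) (tok : String) (h : "[" ∉ seg) :
    pvTail (seg ++ [tok]) = [] := by
  unfold pvTail
  by_cases htok : tok = "["
  · subst htok
    rw [PySem.List.index?_append_singleton_self _ _ h]
    simp
  · have hne : "[" ∉ seg ++ [tok] := by
      intro hm
      rcases List.mem_append.1 hm with h' | h'
      · exact h h'
      · simp at h'; exact htok h'.symm
    rw [(PySem.List.index?_eq_none_iff _ _).2 hne]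

lemma pvFlush_eq (seg : List String) :
    PySem.Str.join " " (pvTail seg) =
      (if seg.contains "[" then
        PySem.Str.join " " (seg.drop (((PySem.List.index? seg "[").getD 0) + 1))
      else "") := by
  by_cases h : "[" ∈ seg
  · rcases Option.isSome_iff_exists.1 ((PySem.List.index?_isSome_iff (xs := seg) (v := "[")).2 h) with ⟨i, hi⟩
    unfold pvTail
    rw [hi, if_pos (List.contains_iff_mem.2 h)]
    rfl
  · have hn : PySem.List.index? seg "[" = none := (PySem.List.index?_eq_none_iff _ _).2 h
    unfold pvTail
    rw [hn, if_neg (by simpa using h)]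
    show PySem.Str.join " " [] = ""
    decide

lemma pvFold_eq (toks : List String) (res seg : List String) :
    (toks.foldl pvStepA (res, pvTail seg, seg.contains "[")).1 =
    (toks.foldl pvStepB (res, seg)).1 := by
  induction toks generalizing res seg with
  | nil => rfl
  | cons tok rest ih =>
    by_cases hbr : tok = "]"
    · subst hbr
      simp only [List.foldl_cons, pvStepA, pvStepB]
      have h1 : (("]" : String) == "]") = true := by decide
      have h2 : (("]" : String) == "[") = false := by decide
      simp only [h1, h2, if_true, if_false, Bool.false_eq_true]
      rw [pvFlush_eq]
      simpa using ih (res ++ [if seg.contains "[" then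
          PySem.Str.join " " (seg.drop (((PySem.List.index? seg "[").getD 0) + 1))
        else ""]) []
    · have h1 : (tok == "]") = false := by simpa using hbr
      simp only [List.foldl_cons, pvStepA, pvStepB, h1, if_false, Bool.false_eq_true]
      by_cases hmem : "[" ∈ seg
      · have hc : seg.contains "[" = true := List.contains_iff_mem.2 hmem
        have hc' : (seg ++ [tok]).contains "[" = true := by
          simp [hmem]
        by_cases hlb : tok = "["
        · subst hlb
          simp only [hc, if_true, beq_self_eq_true]
          have := ih res (seg ++ ["["])
          rw [hc', pvTail_append_mem _ _ hmem] at this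
          simpa using this
        · have h2 : (tok == "[") = false := by simpa using hlb
          simp only [hc, if_true, h2, if_false, Bool.false_eq_true]
          have := ih res (seg ++ [tok])
          rw [hc', pvTail_append_mem _ _ hmem] at this
          exact this
      · have hc : seg.contains "[" = false := by simpa using hmem
        have htl : pvTail seg = [] := by
          unfold pvTail
          rw [(PySem.List.index?_eq_none_iff _ _).2 hmem]
        by_cases hlb : tok = "["
        · subst hlb
          simp only [hc, if_false, beq_self_eq_true, if_true, Bool.false_eq_true]
          have := ih res (seg ++ ["["])
          have hc' : (seg ++ ["["]).contains "[" = true := by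
            simp
          rw [hc', pvTail_append_not_mem _ _ hmem] at this
          simpa [htl] using this
        · have h2 : (tok == "[") = false := by simpa using hlb
          simp only [hc, h2, if_false, Bool.false_eq_true]
          have := ih res (seg ++ [tok])
          have hc' : (seg ++ [tok]).contains "[" = false := by
            simp [hmem]
            exact fun h => hlb h.symm
          rw [hc', pvTail_append_not_mem _ _ hmem] at this
          simpa [htl] using this

-- ===== VERDICT (by name: the statement is the Claim_ definition above) =====
theorem extract_table_answers_spec : Claim_equal_extract_table_answers := by
  intro text _
  unfold Spec_extract_table_answers extract_table_answers extract_table_answers_alt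
  simpa using pvFold_eq (PySem.Str.split₀ text) [] []
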